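-- pv_equiv track=rewrite | github.com/ammadeus/python | homework_7.py | get_subjects_not_passed_by_all_students
-- ===== SOURCE A (Python) =====
-- def get_subjects_not_passed_by_all_students(student_exams):
--     subjects_not_passed = set()
--     subjects_scores = {}
--
--     for name, score, subject in student_exams:
--         if subject in subjects_scores:
--             if score < subjects_scores[subject]:
--                 subjects_scores[subject] = score
--         else:
--             subjects_scores[subject] = score
--
--     for name, score, subject in student_exams:
--         if score < 60 and score == subjects_scores[subject]:
--             subjects_not_passed.add(subject)
--
--     return subjects_not_passed
-- ===== SOURCE B (Python) =====
-- def get_subjects_not_passed_by_all_students(student_exams):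
--     # a subject is failed iff some exam scores < 60 and no exam of that subject scores lower
--     return {subject
--             for _name, score, subject in student_exams
--             if score < 60 and all(score <= other
--                                   for _n, other, subj2 in student_exams
--                                   if subj2 == subject)}
-- ===== Notes on version B (the rewrite author's own statement) =====
-- stated objective: simpler
-- what changed: Replaces the min-score dict plus a second raw-data scan by a single set comprehension that keeps a subject when one of its sub-60 scores is <= every score recorded for that subject.
import Mathlib
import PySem

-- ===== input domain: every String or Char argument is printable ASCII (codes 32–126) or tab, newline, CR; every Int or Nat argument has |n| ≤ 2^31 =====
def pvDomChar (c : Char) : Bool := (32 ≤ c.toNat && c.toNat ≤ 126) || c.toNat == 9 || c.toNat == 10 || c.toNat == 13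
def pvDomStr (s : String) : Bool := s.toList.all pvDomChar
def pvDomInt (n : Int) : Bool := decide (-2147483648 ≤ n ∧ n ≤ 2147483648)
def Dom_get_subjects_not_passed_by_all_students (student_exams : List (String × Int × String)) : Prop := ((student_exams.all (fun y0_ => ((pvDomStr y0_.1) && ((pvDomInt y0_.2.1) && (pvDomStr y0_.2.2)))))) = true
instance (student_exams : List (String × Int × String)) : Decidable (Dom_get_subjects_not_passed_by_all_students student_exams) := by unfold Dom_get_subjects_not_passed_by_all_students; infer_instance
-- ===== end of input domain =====

-- B replaces A's min-score dict plus second raw-data scan by one set comprehension testing each sub-60 score against all scores of its subject (simpler, not faster).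


-- ===== PORT A =====
-- first pass: subjects_scores[subject] = running minimum
def pvAStep (d : PySem.Dict String Int) (t : String × Int × String) : PySem.Dict String Int :=
  if d.contains t.2.2 then
    (if t.2.1 < (d.get? t.2.2).getD 0 then d.insert t.2.2 t.2.1 else d)  -- getD 0 is exact: contains holds
  else d.insert t.2.2 t.2.1

def get_subjects_not_passed_by_all_students (student_exams : List (String × Int × String)) : List String :=
  let subjects_scores := student_exams.foldl pvAStep PySem.Dict.empty
  -- `subjects_scores[subject]` never raises KeyError: the subject was inserted in the first pass,
  -- so `score == subjects_scores[subject]` is exactly `get? subject = some score`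
  student_exams.foldl
    (fun s t => if t.2.1 < 60 ∧ subjects_scores.get? t.2.2 = some t.2.1 then PySem.Set.add s t.2.2 else s)
    PySem.Set.empty

-- ===== PORT B =====
def get_subjects_not_passed_by_all_students_alt (student_exams : List (String × Int × String)) : List String :=
  PySem.Set.ofList
    ((student_exams.filter (fun t =>
        decide (t.2.1 < 60) &&
        (student_exams.filter (fun u => u.2.2 == t.2.2)).all (fun u => decide (t.2.1 ≤ u.2.1)))).map
      (fun t => t.2.2))

-- ===== PRECONDITION & SPEC =====
def Spec_get_subjects_not_passed_by_all_students (student_exams : List (String × Int × String)) (out : List String) : Prop := out = get_subjects_not_passed_by_all_students_alt student_exams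
instance (student_exams : List (String × Int × String)) (out : List String) : Decidable (Spec_get_subjects_not_passed_by_all_students student_exams out) := by unfold Spec_get_subjects_not_passed_by_all_students; infer_instance

-- ===== CLAIM (what is proved, stated in full; the proofs are below) =====
def Claim_equal_get_subjects_not_passed_by_all_students : Prop := ∀ (student_exams : List (String × Int × String)), Dom_get_subjects_not_passed_by_all_students student_exams → Spec_get_subjects_not_passed_by_all_students student_exams (get_subjects_not_passed_by_all_students student_exams)

-- ===== LEMMAS AND PROOFS =====

def pvOptMin (o : Option Int) (s : Int) : Option Int :=
  some (match o with | none => s | some m => min m s)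

-- the dict lookup after the first pass is a left fold of pvOptMin over the subject's scores
theorem pvAStep_get? (xs : List (String × Int × String)) (d : PySem.Dict String Int) (subj : String) :
    (xs.foldl pvAStep d).get? subj =
      xs.foldl (fun o t => if t.2.2 = subj then pvOptMin o t.2.1 else o) (d.get? subj) := by
  induction xs generalizing d with
  | nil => rfl
  | cons t rest ih =>
    simp only [List.foldl_cons]
    rw [ih]
    congr 1
    unfold pvAStep pvOptMin
    rw [PySem.Dict.contains_eq_isSome_get?]
    by_cases he : t.2.2 = subj
    · subst he
      cases hg : d.get? t.2.2 with
      | none => simp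
      | some m =>
        simp only [Option.isSome_some, if_true, Option.getD_some]
        by_cases hlt : t.2.1 < m
        · simp [hlt, min_eq_right (le_of_lt hlt)]
        · simp [hlt, hg, min_eq_left (by omega : m ≤ t.2.1)]
    · cases hg : d.get? t.2.2 with
      | none => simp [PySem.Dict.get?_insert, he, Ne.symm he]
      | some m =>
        simp only [Option.isSome_some, if_true, Option.getD_some]
        by_cases hlt : t.2.1 < m
        · simp [hlt, PySem.Dict.get?_insert, he, Ne.symm he]
        · simp [hlt, he]

theorem pvOptMin_fold_some (S : List Int) (m : Int) :
    S.foldl pvOptMin (some m) = some (S.foldl min m) := by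
  induction S generalizing m with
  | nil => rfl
  | cons a S ih => simp [pvOptMin, ih]

theorem pvOptMin_fold_none (S : List Int) : S.foldl pvOptMin none = S.min? := by
  cases S with
  | nil => rfl
  | cons a S =>
    show S.foldl pvOptMin (pvOptMin none a) = _
    rw [show pvOptMin none a = some a from rfl, pvOptMin_fold_some, List.min?_cons']

-- condition equivalence: score == final min  ↔  score ≤ every score of that subject
theorem pv_cond_iff (xs : List (String × Int × String)) (t : String × Int × String) (ht : t ∈ xs) :
    ((xs.foldl pvAStep PySem.Dict.empty).get? t.2.2 = some t.2.1)
      ↔ (∀ u ∈ xs, u.2.2 = t.2.2 → t.2.1 ≤ u.2.1) := by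
  rw [pvAStep_get?]
  have hfold : xs.foldl (fun o u => if u.2.2 = t.2.2 then pvOptMin o u.2.1 else o)
      ((PySem.Dict.empty : PySem.Dict String Int).get? t.2.2)
      = ((xs.filter (fun u => u.2.2 == t.2.2)).map (fun u => u.2.1)).min? := by
    rw [← pvOptMin_fold_none, List.foldl_map, List.foldl_filter]
    simp
  rw [hfold, List.min?_eq_some_iff]
  constructor
  · rintro ⟨-, hle⟩ u hu he
    exact hle u.2.1 (List.mem_map.2 ⟨u, List.mem_filter.2 ⟨hu, by simp [he]⟩, rfl⟩)
  · intro h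
    refine ⟨List.mem_map.2 ⟨t, List.mem_filter.2 ⟨ht, by simp⟩, rfl⟩, ?_⟩
    rintro b hb
    obtain ⟨u, hu, rfl⟩ := List.mem_map.1 hb
    obtain ⟨hu, he⟩ := List.mem_filter.1 hu
    exact h u hu (by simpa using he)

-- ===== VERDICT (by name: the statement is the Claim_ definition above) =====
theorem get_subjects_not_passed_by_all_students_spec : Claim_equal_get_subjects_not_passed_by_all_students := by
  intro xs _
  unfold Spec_get_subjects_not_passed_by_all_students
  unfold get_subjects_not_passed_by_all_students get_subjects_not_passed_by_all_students_alt
  show xs.foldl _ PySem.Set.empty = PySem.Set.ofList _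
  rw [show (PySem.Set.ofList ((xs.filter _).map (fun t => t.2.2)) : List String)
        = ((xs.filter (fun t => decide (t.2.1 < 60) &&
            (xs.filter (fun u => u.2.2 == t.2.2)).all (fun u => decide (t.2.1 ≤ u.2.1)))).map
            (fun t => t.2.2)).foldl PySem.Set.add [] from rfl,
      List.foldl_map, List.foldl_filter]
  refine PySem.List.foldl_congr_mem xs _ _ _ (fun acc t ht => ?_)
  by_cases hc : ∀ u ∈ xs, u.2.2 = t.2.2 → t.2.1 ≤ u.2.1
  · by_cases h60 : t.2.1 < 60
    · have : (xs.foldl pvAStep PySem.Dict.empty).get? t.2.2 = some t.2.1 :=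
        (pv_cond_iff xs t ht).2 hc
      have hall : ((xs.filter (fun u => u.2.2 == t.2.2)).all (fun u => decide (t.2.1 ≤ u.2.1))) = true := by
        simp only [List.all_eq_true]
        intro u hu
        obtain ⟨hu', he⟩ := List.mem_filter.1 hu
        simpa using hc u hu' (by simpa using he)
      simp [this, h60, hall]
    · have h1 : ¬ (t.2.1 < 60 ∧ (xs.foldl pvAStep PySem.Dict.empty).get? t.2.2 = some t.2.1) :=
        fun h => h60 h.1
      simp [h60]
  · have h2 : (xs.foldl pvAStep PySem.Dict.empty).get? t.2.2 ≠ some t.2.1 :=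
      fun h => hc ((pv_cond_iff xs t ht).1 h)
    have h3 : ¬ (t.2.1 < 60 ∧ (xs.foldl pvAStep PySem.Dict.empty).get? t.2.2 = some t.2.1) :=
      fun h => h2 h.2
    rw [if_neg h3, if_neg]
    simp only [Bool.and_eq_true, List.all_eq_true, not_and]
    intro _ hall
    apply hc
    intro u hu he
    simpa using hall u (List.mem_filter.2 ⟨hu, by simp [he]⟩)
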